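-- pv_equiv track=rewrite | github.com/getokay/Password-manager | cifrar_v2.py | bifido_paso_inv_1
-- ===== SOURCE A (Python) =====
-- def bifido_paso_inv_1(numeros):
--     lista1 = []
--     lista2 = []
--     for i in range(len(numeros)):
--         if i % 2 == 0:
--             lista1.append(numeros[i])
--         else:
--             lista2.append(numeros[i])
--     codigo = []
--     count = 0
--     dupla = []
--     for i in range(len(lista1)):
--         if count == 2:
--             codigo.append(dupla)
--         if count < 2:
--             dupla.append(lista1[i])
--             count += 1
--         else:
--             count = 1
--             dupla = [lista1[i]]
--     for i in range(len(lista2)):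
--         if count == 2:
--             codigo.append(dupla)
--             dupla = []
--             count = 0
--         if count < 2:
--             dupla.append(lista2[i])
--             count += 1
--         else:
--             count = 1
--             dupla = [lista2[i]]
--         if count == 2 and i == len(lista2) - 1:
--             codigo.append(dupla)
--     return codigo
-- ===== SOURCE B (Python) =====
-- def bifido_paso_inv_1(numeros):
--     n = len(numeros)
--     h = (n + 1) // 2  # number of even-indexed elements
--
--     def src(j):
--         # j-th element of the stream (even-indexed elements, then odd-indexed)
--         return numeros[2 * j] if j < h else numeros[2 * (j - h) + 1]
--
--     return [[src(2 * k), src(2 * k + 1)] for k in range(n // 2)]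
-- ===== Notes on version B (the rewrite author's own statement) =====
-- stated objective: alternative
-- what changed: Replaces A's two intermediate even/odd lists and its count/dupla state machine by a closed-form index mapping: pair k is read directly from the input at computed positions, no intermediate lists and no mutable pairing state.
import Mathlib
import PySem

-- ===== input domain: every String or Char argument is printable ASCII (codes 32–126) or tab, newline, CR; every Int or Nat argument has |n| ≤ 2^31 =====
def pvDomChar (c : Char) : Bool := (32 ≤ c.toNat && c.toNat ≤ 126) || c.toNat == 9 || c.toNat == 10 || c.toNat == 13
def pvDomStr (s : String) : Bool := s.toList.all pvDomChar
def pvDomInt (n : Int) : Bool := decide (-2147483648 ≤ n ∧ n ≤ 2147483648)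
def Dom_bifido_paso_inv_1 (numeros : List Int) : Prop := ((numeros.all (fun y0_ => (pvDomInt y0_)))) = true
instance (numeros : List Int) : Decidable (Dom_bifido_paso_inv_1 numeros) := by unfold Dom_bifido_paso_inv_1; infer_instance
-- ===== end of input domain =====

-- B replaces A's two intermediate even/odd lists and its count/dupla pairing
-- state machine by a closed-form index mapping (objective: alternative).


-- ===== PORT A =====
-- body of A's first loop: if i % 2 == 0: lista1.append(x) else: lista2.append(x)
def pvBody1 (s : List Int × List Int) (i x : Int) : List Int × List Int :=
  if PySem.Int.mod i 2 == 0 then (s.1 ++ [x], s.2) else (s.1, s.2 ++ [x])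

-- body of A's second loop (state = (codigo, count, dupla))
def pvStep2 (s : List (List Int) × Int × List Int) (x : Int) : List (List Int) × Int × List Int :=
  let s := if s.2.1 == 2 then (s.1 ++ [s.2.2], s.2.1, s.2.2) else s
  if s.2.1 < 2 then (s.1, s.2.1 + 1, s.2.2 ++ [x]) else (s.1, 1, [x])

-- body of A's third loop (L = len(lista2); i the loop index)
def pvStep3 (L : Int) (s : List (List Int) × Int × List Int) (i x : Int) :
    List (List Int) × Int × List Int :=
  let s := if s.2.1 == 2 then (s.1 ++ [s.2.2], 0, ([] : List Int)) else s
  let s := if s.2.1 < 2 then (s.1, s.2.1 + 1, s.2.2 ++ [x]) else (s.1, 1, [x])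
  if s.2.1 == 2 && i == L - 1 then (s.1 ++ [s.2.2], s.2.1, s.2.2) else s

def bifido_paso_inv_1 (numeros : List Int) : List (List Int) :=
  -- for i in range(len(numeros)): append numeros[i] to lista1/lista2 by parity of i
  let p := (PySem.List.pyRange 0 (numeros.length : Int)).foldl
    (fun s i => pvBody1 s i (PySem.List.pyGetD numeros i 0)) (([], []) : List Int × List Int)
  let lista1 := p.1
  let lista2 := p.2
  -- for i in range(len(lista1)): …
  let s1 := (PySem.List.pyRange 0 (lista1.length : Int)).foldl
    (fun s i => pvStep2 s (PySem.List.pyGetD lista1 i 0))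
    (([], 0, []) : List (List Int) × Int × List Int)
  -- for i in range(len(lista2)): …
  let s2 := (PySem.List.pyRange 0 (lista2.length : Int)).foldl
    (fun s i => pvStep3 (lista2.length : Int) s i (PySem.List.pyGetD lista2 i 0)) s1
  s2.1

-- ===== PORT B =====
-- src(j): j-th element of the stream (even-indexed elements, then odd-indexed)
def pvSrc (numeros : List Int) (h j : Int) : Int :=
  if j < h then PySem.List.pyGetD numeros (2 * j) 0
  else PySem.List.pyGetD numeros (2 * (j - h) + 1) 0

def bifido_paso_inv_1_alt (numeros : List Int) : List (List Int) :=
  let n : Int := numeros.length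
  let h : Int := PySem.Int.floordiv (n + 1) 2
  (PySem.List.pyRange 0 (PySem.Int.floordiv n 2)).map
    (fun k => [pvSrc numeros h (2 * k), pvSrc numeros h (2 * k + 1)])

-- ===== PRECONDITION & SPEC =====
def Spec_bifido_paso_inv_1 (numeros : List Int) (out : List (List Int)) : Prop := out = bifido_paso_inv_1_alt numeros
instance (numeros : List Int) (out : List (List Int)) : Decidable (Spec_bifido_paso_inv_1 numeros out) := by unfold Spec_bifido_paso_inv_1; infer_instance

-- ===== CLAIM (what is proved, stated in full; the proofs are below) =====
def Claim_equal_bifido_paso_inv_1 : Prop := ∀ (numeros : List Int), Dom_bifido_paso_inv_1 numeros → Spec_bifido_paso_inv_1 numeros (bifido_paso_inv_1 numeros)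

-- ===== LEMMAS AND PROOFS =====

-- (evens, odds) of a list, by positions
def pvSplit : List Int → List Int × List Int
  | [] => ([], [])
  | x :: t => (x :: (pvSplit t).2, (pvSplit t).1)

-- consecutive full pairs, leftover dropped
def pvChunk2 : List Int → List (List Int)
  | x :: y :: t => [x, y] :: pvChunk2 t
  | _ => []

-- length of the even-length prefix already flushed into codigo by A's second loop
def pvM (t : List Int) : Nat := 2 * ((t.length - 1) / 2)
def pvPend (t : List Int) : List Int := t.drop (pvM t)
def pvDone (t : List Int) : List (List Int) := pvChunk2 (t.take (pvM t))

theorem pvM_le (t : List Int) : pvM t ≤ t.length := by unfold pvM; omega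

theorem pvM_small {t : List Int} (h : t.length ≤ 2) : pvM t = 0 := by unfold pvM; omega

theorem pvPend_len_le (t : List Int) : (pvPend t).length ≤ 2 := by
  unfold pvPend pvM; simp; omega

theorem pvM_cons₂ (a b : Int) (t : List Int) (h : t ≠ []) :
    pvM (a :: b :: t) = pvM t + 2 := by
  have : 1 ≤ t.length := List.length_pos_iff.mpr h
  unfold pvM; simp only [List.length_cons]; omega

theorem pvDone_cons₂ (a b : Int) (t : List Int) (h : t ≠ []) :
    pvDone (a :: b :: t) = [a, b] :: pvDone t := by
  unfold pvDone; rw [pvM_cons₂ a b t h]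
  simp only [List.take_succ_cons, pvChunk2]

theorem pvPend_cons₂ (a b : Int) (t : List Int) (h : t ≠ []) :
    pvPend (a :: b :: t) = pvPend t := by
  unfold pvPend; rw [pvM_cons₂ a b t h]; simp

theorem pvChunk2_append_even : ∀ (p q : List Int), p.length % 2 = 0 →
    pvChunk2 (p ++ q) = pvChunk2 p ++ pvChunk2 q
  | [], q, _ => by simp [pvChunk2]
  | [a], q, h => by simp at h
  | a :: b :: p, q, h => by
    have h' : p.length % 2 = 0 := by simp only [List.length_cons] at h; omega
    simp only [List.cons_append, pvChunk2, pvChunk2_append_even p q h']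

theorem pvChunk2_eq_range : ∀ (s : List Int),
    pvChunk2 s = (List.range (s.length / 2)).map
      (fun k => [s.getD (2 * k) 0, s.getD (2 * k + 1) 0])
  | [] => by simp [pvChunk2]
  | [a] => by simp [pvChunk2]
  | a :: b :: t => by
    have hl : (a :: b :: t).length / 2 = t.length / 2 + 1 := by simp; omega
    rw [hl, List.range_succ_eq_map]
    simp only [List.map_cons, List.map_map]
    have h0 : [(a :: b :: t).getD (2 * 0) 0, (a :: b :: t).getD (2 * 0 + 1) 0] = [a, b] := by
      simp [List.getD]
    rw [h0]
    have hmap : ∀ k : Nat,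
        ((fun k => [(a :: b :: t).getD (2 * k) 0, (a :: b :: t).getD (2 * k + 1) 0]) ∘ Nat.succ) k
        = [t.getD (2 * k) 0, t.getD (2 * k + 1) 0] := by
      intro k
      have e1 : 2 * Nat.succ k = 2 * k + 1 + 1 := by omega
      simp only [Function.comp, e1, List.getD_cons_succ]
    rw [List.map_congr_left (fun k _ => hmap k)]
    simp only [pvChunk2, pvChunk2_eq_range t]

theorem pvSplit_len : ∀ (xs : List Int),
    (pvSplit xs).1.length = (xs.length + 1) / 2 ∧ (pvSplit xs).2.length = xs.length / 2
  | [] => by simp [pvSplit]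
  | x :: t => by
    have := pvSplit_len t
    simp only [pvSplit, List.length_cons]
    omega

theorem pvSplit_get : ∀ (xs : List Int) (j : Nat),
    (pvSplit xs).1[j]? = xs[2 * j]? ∧ (pvSplit xs).2[j]? = xs[2 * j + 1]?
  | [], j => by simp [pvSplit]
  | x :: t, j => by
    constructor
    · cases j with
      | zero => simp [pvSplit]
      | succ j =>
        have := (pvSplit_get t j).2
        have e : 2 * (j + 1) = (2 * j + 1) + 1 := by omega
        simp only [pvSplit, e, List.getElem?_cons_succ]
        exact this
    · have := (pvSplit_get t j).1
      simp only [pvSplit, List.getElem?_cons_succ]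
      exact this

-- enumerate over a snoc
theorem pvEnum_snoc (xs : List Int) (y : Int) (s : Int) :
    PySem.List.enumerate (xs ++ [y]) s
      = PySem.List.enumerate xs s ++ [(s + xs.length, y)] := by
  induction xs generalizing s with
  | nil => simp [PySem.List.enumerate_cons]
  | cons x t ih =>
    simp only [List.cons_append, PySem.List.enumerate_cons, ih, List.length_cons]
    have : s + 1 + (t.length : Int) = s + ((t.length : Int) + 1) := by ring
    rw [this]
    push_cast
    ring_nf

-- a fold over range(len(xs)) reading xs[i] is a fold over enumerate(xs)
theorem pvFoldl_range_enum {σ : Type} (xs : List Int) (f : σ → Int → Int → σ) (init : σ) :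
    (PySem.List.pyRange 0 (xs.length : Int)).foldl
      (fun s i => f s i (PySem.List.pyGetD xs i 0)) init
    = (PySem.List.enumerate xs 0).foldl (fun s p => f s p.1 p.2) init := by
  induction xs using List.reverseRecOn generalizing init with
  | nil => simp [PySem.List.pyRange_one_eq_nil (le_refl 0)]
  | append_singleton ys y ih =>
    have hlen : ((ys ++ [y]).length : Int) = (ys.length : Int) + 1 := by simp
    rw [hlen, PySem.List.pyRange_one_succ_right (by positivity), List.foldl_append]
    have hcongr : (PySem.List.pyRange 0 (ys.length : Int)).foldl
        (fun s i => f s i (PySem.List.pyGetD (ys ++ [y]) i 0)) init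
        = (PySem.List.pyRange 0 (ys.length : Int)).foldl
        (fun s i => f s i (PySem.List.pyGetD ys i 0)) init := by
      apply PySem.List.foldl_congr_mem
      intro acc i hi
      rw [PySem.List.mem_pyRange_one] at hi
      have h1 : PySem.List.pyGetD (ys ++ [y]) i 0 = PySem.List.pyGetD ys i 0 := by
        rw [PySem.List.pyGetD_of_nonneg _ _ hi.1, PySem.List.pyGetD_of_nonneg _ _ hi.1]
        exact List.getD_append _ _ _ _ (by omega)
      rw [h1]
    rw [hcongr, ih]
    have hlast : PySem.List.pyGetD (ys ++ [y]) (ys.length : Int) 0 = y := by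
      rw [PySem.List.pyGetD_natCast]
      simp [List.getD_eq_getElem?_getD]
    rw [pvEnum_snoc, List.foldl_append]
    simp [hlast]

-- fold over enumerate that ignores the index is a plain fold
theorem pvFoldl_enum_snd {σ : Type} (xs : List Int) (g : σ → Int → σ) (init : σ) (s : Int) :
    (PySem.List.enumerate xs s).foldl (fun a p => g a p.2) init = xs.foldl g init := by
  conv_rhs => rw [← PySem.List.map_snd_enumerate xs s]
  rw [List.foldl_map]

-- A's first loop splits by index parity
theorem pvLoop1_run : ∀ (xs : List Int) (s : Int) (acc : List Int × List Int), 0 ≤ s →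
    (PySem.List.enumerate xs s).foldl (fun a p => pvBody1 a p.1 p.2) acc
    = if s % 2 = 0 then (acc.1 ++ (pvSplit xs).1, acc.2 ++ (pvSplit xs).2)
      else (acc.1 ++ (pvSplit xs).2, acc.2 ++ (pvSplit xs).1)
  | [], s, acc, _ => by
    simp only [PySem.List.enumerate_nil, List.foldl_nil, pvSplit, List.append_nil]
    split <;> rfl
  | x :: t, s, acc, hs => by
    rw [PySem.List.enumerate_cons]
    simp only [List.foldl_cons]
    have hrec := pvLoop1_run t (s + 1) (pvBody1 acc s x) (by omega)
    rw [hrec]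
    by_cases h : s % 2 = 0
    · have h1 : (s + 1) % 2 ≠ 0 := by omega
      simp [pvBody1, h, h1, pvSplit, List.append_assoc]
    · have h1 : (s + 1) % 2 = 0 := by omega
      simp [pvBody1, h, h1, pvSplit, List.append_assoc]


-- A's second loop: flushed pairs + pending dupla
theorem pvLoop2_run : ∀ (t : List Int) (c : List (List Int)) (d : List Int),
    d.length ≤ 2 →
    t.foldl pvStep2 (c, (d.length : Int), d)
    = (c ++ pvDone (d ++ t), ((pvPend (d ++ t)).length : Int), pvPend (d ++ t))
  | [], c, d, hd => by
    have hm : pvM d = 0 := pvM_small hd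
    unfold pvDone pvPend
    simp [hm, pvChunk2]
  | x :: t, c, d, hd => by
    match d, hd with
    | [], _ =>
      have h1 : pvStep2 (c, ((List.length ([] : List Int) : Nat) : Int), []) x
          = (c, (([x] : List Int).length : Int), [x]) := by
        simp [pvStep2]
      simp only [List.foldl_cons, h1, pvLoop2_run t c [x] (by simp)]
      simp
    | [a], _ =>
      have h1 : pvStep2 (c, (([a] : List Int).length : Int), [a]) x
          = (c, (([a, x] : List Int).length : Int), [a, x]) := by
        simp [pvStep2]
      simp only [List.foldl_cons, h1, pvLoop2_run t c [a, x] (by simp)]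
      simp
    | [a, b], _ =>
      have h1 : pvStep2 (c, (([a, b] : List Int).length : Int), [a, b]) x
          = (c ++ [[a, b]], (([x] : List Int).length : Int), [x]) := by
        simp [pvStep2]
      simp only [List.foldl_cons, h1, pvLoop2_run t (c ++ [[a, b]]) [x] (by simp)]
      rw [show ([a, b] ++ x :: t : List Int) = a :: b :: (x :: t) by rfl,
        pvDone_cons₂ a b (x :: t) (by simp), pvPend_cons₂ a b (x :: t) (by simp)]
      simp
    | a :: b :: c' :: t', hd =>
      simp only [List.length_cons] at hd
      omega

-- A's third loop: chunks the pending dupla followed by the odd elements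
theorem pvLoop3_run : ∀ (o : List Int) (L : Int) (k : Nat) (c : List (List Int)) (d : List Int),
    d.length ≤ 2 → (k : Int) + o.length = L → (o = [] → d.length ≤ 1) →
    ((PySem.List.enumerate o (k : Int)).foldl (fun s p => pvStep3 L s p.1 p.2)
      (c, (d.length : Int), d)).1
    = c ++ pvChunk2 (d ++ o)
  | [], L, k, c, d, hd, hk, hnil => by
    match d, hnil rfl with
    | [], _ => simp [pvChunk2]
    | [a], _ => simp [pvChunk2]
    | a :: b :: t, h => simp only [List.length_cons] at h; omega
  | x :: rest, L, k, c, d, hd, hk, _ => by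
    rw [PySem.List.enumerate_cons]
    simp only [List.foldl_cons]
    have hk' : ((k + 1 : Nat) : Int) + (rest.length : Int) = L := by
      push_cast [List.length_cons] at hk ⊢; omega
    have hcast : ((k : Int) + 1) = ((k + 1 : Nat) : Int) := by push_cast; ring
    match d, hd with
    | [], _ =>
      have h1 : pvStep3 L (c, ((List.length ([] : List Int) : Nat) : Int), []) (k : Int) x
          = (c, (([x] : List Int).length : Int), [x]) := by
        simp [pvStep3]
      rw [h1, hcast,
        pvLoop3_run rest L (k + 1) c [x] (by simp) hk' (by intro h; simp)]
      simp
    | [a], _ =>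
      by_cases hr : rest = []
      · subst hr
        have hkL : (k : Int) = L - 1 := by push_cast [List.length_cons, List.length_nil] at hk; omega
        have h1 : pvStep3 L (c, (([a] : List Int).length : Int), [a]) (k : Int) x
            = (c ++ [[a, x]], 2, [a, x]) := by
          simp [pvStep3, hkL]
        rw [h1]
        simp [pvChunk2]
      · have hkL : (k : Int) ≠ L - 1 := by
          have : 1 ≤ rest.length := List.length_pos_iff.mpr hr
          push_cast [List.length_cons, List.length_nil] at hk; omega
        have h1 : pvStep3 L (c, (([a] : List Int).length : Int), [a]) (k : Int) x
            = (c, (([a, x] : List Int).length : Int), [a, x]) := by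
          simp [pvStep3, hkL]
        rw [h1, hcast,
          pvLoop3_run rest L (k + 1) c [a, x] (by simp) hk' (by intro h; exact absurd h hr)]
        simp
    | [a, b], _ =>
      have h1 : pvStep3 L (c, (([a, b] : List Int).length : Int), [a, b]) (k : Int) x
          = (c ++ [[a, b]], (([x] : List Int).length : Int), [x]) := by
        simp [pvStep3]
      rw [h1, hcast,
        pvLoop3_run rest L (k + 1) (c ++ [[a, b]]) [x] (by simp) hk' (by intro h; simp)]
      simp [pvChunk2, List.append_assoc]
    | a :: b :: c' :: t', hd => simp only [List.length_cons] at hd; omega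

-- A computes the pair-chunking of (evens ++ odds)
theorem pvA_eq_chunk (numeros : List Int) :
    bifido_paso_inv_1 numeros
      = pvChunk2 ((pvSplit numeros).1 ++ (pvSplit numeros).2) := by
  obtain ⟨hel, hol⟩ := pvSplit_len numeros
  unfold bifido_paso_inv_1
  have hl1 : (PySem.List.pyRange 0 (numeros.length : Int)).foldl
      (fun s i => pvBody1 s i (PySem.List.pyGetD numeros i 0)) (([], []) : List Int × List Int)
      = ((pvSplit numeros).1, (pvSplit numeros).2) := by
    rw [pvFoldl_range_enum numeros (fun s i x => pvBody1 s i x)]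
    rw [pvLoop1_run numeros 0 ([], []) (le_refl 0)]
    simp
  rw [hl1]
  dsimp only
  have hl2 : (PySem.List.pyRange 0 ((pvSplit numeros).1.length : Int)).foldl
      (fun s i => pvStep2 s (PySem.List.pyGetD (pvSplit numeros).1 i 0))
      (([], 0, []) : List (List Int) × Int × List Int)
      = ([] ++ pvDone ([] ++ (pvSplit numeros).1),
         ((pvPend ([] ++ (pvSplit numeros).1)).length : Int), pvPend ([] ++ (pvSplit numeros).1)) := by
    rw [pvFoldl_range_enum (pvSplit numeros).1 (fun s _ x => pvStep2 s x)]
    rw [pvFoldl_enum_snd (pvSplit numeros).1 pvStep2 _ 0]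
    exact pvLoop2_run (pvSplit numeros).1 [] [] (by simp)
  rw [hl2]
  simp only [List.nil_append]
  have hl3 : ((PySem.List.pyRange 0 ((pvSplit numeros).2.length : Int)).foldl
      (fun s i => pvStep3 ((pvSplit numeros).2.length : Int) s i
        (PySem.List.pyGetD (pvSplit numeros).2 i 0))
      (pvDone (pvSplit numeros).1, ((pvPend (pvSplit numeros).1).length : Int),
        pvPend (pvSplit numeros).1)).1
      = pvDone (pvSplit numeros).1
        ++ pvChunk2 (pvPend (pvSplit numeros).1 ++ (pvSplit numeros).2) := by
    rw [pvFoldl_range_enum (pvSplit numeros).2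
      (fun s i x => pvStep3 ((pvSplit numeros).2.length : Int) s i x)]
    exact pvLoop3_run (pvSplit numeros).2 ((pvSplit numeros).2.length : Int) 0
      (pvDone (pvSplit numeros).1) (pvPend (pvSplit numeros).1)
      (pvPend_len_le _) (by simp)
      (by intro hon
          have ho0 : (pvSplit numeros).2.length = 0 := by rw [hon]; rfl
          have he1 : (pvSplit numeros).1.length ≤ 1 := by omega
          unfold pvPend
          rw [List.length_drop]
          omega)
  rw [hl3]
  have htake : (pvSplit numeros).1.take (pvM (pvSplit numeros).1) ++ pvPend (pvSplit numeros).1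
      = (pvSplit numeros).1 := List.take_append_drop _ _
  have heven : ((pvSplit numeros).1.take (pvM (pvSplit numeros).1)).length % 2 = 0 := by
    rw [List.length_take]
    have := pvM_le (pvSplit numeros).1
    unfold pvM
    omega
  calc pvDone (pvSplit numeros).1 ++ pvChunk2 (pvPend (pvSplit numeros).1 ++ (pvSplit numeros).2)
      = pvChunk2 ((pvSplit numeros).1.take (pvM (pvSplit numeros).1)
          ++ (pvPend (pvSplit numeros).1 ++ (pvSplit numeros).2)) := by
        rw [pvChunk2_append_even _ _ heven]; rfl
    _ = pvChunk2 ((pvSplit numeros).1 ++ (pvSplit numeros).2) := by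
        rw [← List.append_assoc, htake]

-- B computes the same chunking, via its index mapping
theorem pvB_eq_chunk (numeros : List Int) :
    bifido_paso_inv_1_alt numeros
      = pvChunk2 ((pvSplit numeros).1 ++ (pvSplit numeros).2) := by
  obtain ⟨hel, hol⟩ := pvSplit_len numeros
  have hs_len : ((pvSplit numeros).1 ++ (pvSplit numeros).2).length = numeros.length := by
    rw [List.length_append]; omega
  unfold bifido_paso_inv_1_alt
  dsimp only
  have hfd1 : PySem.Int.floordiv ((numeros.length : Int) + 1) 2
      = (((numeros.length + 1) / 2 : Nat) : Int) := by
    rw [show ((numeros.length : Int) + 1) = ((numeros.length + 1 : Nat) : Int) by push_cast; ring,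
      show ((2 : Int)) = ((2 : Nat) : Int) by simp, PySem.Int.floordiv_natCast]
  have hfd2 : PySem.Int.floordiv (numeros.length : Int) 2
      = ((numeros.length / 2 : Nat) : Int) := by
    rw [show ((2 : Int)) = ((2 : Nat) : Int) by simp, PySem.Int.floordiv_natCast]
  rw [hfd1, hfd2, PySem.List.pyRange_zero_natCast, List.map_map]
  have hsrc : ∀ j : Nat, j < numeros.length →
      pvSrc numeros (((numeros.length + 1) / 2 : Nat) : Int) (j : Int)
      = ((pvSplit numeros).1 ++ (pvSplit numeros).2).getD j 0 := by
    intro j hj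
    unfold pvSrc
    by_cases hjH : j < (numeros.length + 1) / 2
    · rw [if_pos (by exact_mod_cast hjH)]
      rw [show (2 * (j : Int)) = ((2 * j : Nat) : Int) by push_cast; ring,
        PySem.List.pyGetD_natCast]
      rw [List.getD_eq_getElem?_getD, List.getD_eq_getElem?_getD]
      rw [List.getElem?_append_left (by omega), (pvSplit_get numeros j).1]
    · rw [if_neg (by exact_mod_cast hjH)]
      have hHj : (numeros.length + 1) / 2 ≤ j := by omega
      rw [show (2 * ((j : Int) - (((numeros.length + 1) / 2 : Nat) : Int)) + 1)
          = ((2 * (j - (numeros.length + 1) / 2) + 1 : Nat) : Int) by push_cast [hHj]; ring]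
      rw [PySem.List.pyGetD_natCast]
      rw [List.getD_eq_getElem?_getD, List.getD_eq_getElem?_getD]
      rw [List.getElem?_append_right (by omega), hel,
        (pvSplit_get numeros (j - (numeros.length + 1) / 2)).2]
  rw [pvChunk2_eq_range, hs_len]
  apply List.map_congr_left
  intro k hk
  rw [List.mem_range] at hk
  have h1 : (2 : Int) * ((k : Nat) : Int) = ((2 * k : Nat) : Int) := by push_cast; ring
  have h2 : ((2 * k : Nat) : Int) + 1 = ((2 * k + 1 : Nat) : Int) := by push_cast; ring
  simp only [Function.comp, h1, h2]
  rw [hsrc (2 * k) (by omega), hsrc (2 * k + 1) (by omega)]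

-- ===== VERDICT (by name: the statement is the Claim_ definition above) =====
theorem bifido_paso_inv_1_spec : Claim_equal_bifido_paso_inv_1 := by
  intro numeros _
  unfold Spec_bifido_paso_inv_1
  rw [pvA_eq_chunk, pvB_eq_chunk]
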